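-- pv_equiv track=rewrite | github.com/jvecodev/TDE2_Mapper | no_comments/lru.py | algoritmo_lru
-- ===== SOURCE A (Python) =====
-- def algoritmo_lru(sequencia_paginas, num_quadros, pagina_alvo):
--
--     quadros = []
--     uso_recente = {}
--
--     for tempo, pagina in enumerate(sequencia_paginas):
--         if pagina in quadros:
--             uso_recente[pagina] = tempo
--         else:
--             if len(quadros) < num_quadros:
--                 quadros.append(pagina)
--                 uso_recente[pagina] = tempo
--             else:
--                 pagina_lru = min(uso_recente, key=uso_recente.get)
--                 indice_substituicao = quadros.index(pagina_lru)
--                 quadros[indice_substituicao] = pagina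
--                 del uso_recente[pagina_lru]
--                 uso_recente[pagina] = tempo
--
--     try:
--         indice = quadros.index(pagina_alvo)
--         quadro_final = indice + 1
--         return f"Para a sequência fornecida, a página {pagina_alvo} se encontra no Quadro {quadro_final}."
--     except ValueError:
--         return f"Ao final, a página {pagina_alvo} não estava na memória."
-- ===== SOURCE B (Python) =====
-- def algoritmo_lru(sequencia_paginas, num_quadros, pagina_alvo):
--     # page -> frame slot, kept in recency order: least-recently-used first
--     mem = {}
--     for pagina in sequencia_paginas:
--         if pagina in mem:
--             mem[pagina] = mem.pop(pagina)      # move to most-recent end, slot kept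
--         elif len(mem) < num_quadros:
--             mem[pagina] = len(mem)             # occupy the next free frame
--         else:
--             lru = next(iter(mem))              # least recently used page
--             mem[pagina] = mem.pop(lru)         # reuse its frame
--     if pagina_alvo in mem:
--         return f"Para a sequência fornecida, a página {pagina_alvo} se encontra no Quadro {mem[pagina_alvo] + 1}."
--     return f"Ao final, a página {pagina_alvo} não estava na memória."
-- ===== Notes on version B (the rewrite author's own statement) =====
-- stated objective: faster
-- what changed: Replaces A's frame list plus page->timestamp dict (membership scan, min-by-value scan and list.index on every miss) with a single page->slot dict kept in recency order via pop/reinsert, so the LRU victim is just the first key and each step is O(1) amortized.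
import Mathlib
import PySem

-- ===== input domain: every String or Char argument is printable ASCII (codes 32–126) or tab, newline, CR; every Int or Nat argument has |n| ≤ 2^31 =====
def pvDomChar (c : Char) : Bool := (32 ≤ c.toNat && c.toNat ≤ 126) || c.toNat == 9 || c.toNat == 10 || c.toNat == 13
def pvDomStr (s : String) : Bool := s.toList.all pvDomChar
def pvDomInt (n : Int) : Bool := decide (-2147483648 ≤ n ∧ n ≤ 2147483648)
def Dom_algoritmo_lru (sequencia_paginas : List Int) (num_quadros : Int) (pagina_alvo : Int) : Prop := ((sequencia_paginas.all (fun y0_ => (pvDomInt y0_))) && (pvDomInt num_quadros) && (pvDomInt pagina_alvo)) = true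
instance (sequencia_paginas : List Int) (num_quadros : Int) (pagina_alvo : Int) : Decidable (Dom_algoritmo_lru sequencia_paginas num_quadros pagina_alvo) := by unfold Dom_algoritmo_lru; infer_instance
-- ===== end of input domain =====

-- B replaces A's frame list + page→timestamp dict (min-by-value scan and list.index per miss)
-- with a single page→slot dict kept in recency order, so the LRU victim is the first key.

-- ===== PORT A =====
-- one iteration of A's `for tempo, pagina in enumerate(...)` loop; `none` = the Python raised
def pvStepA (nq : Int) (st : Option (List Int × PySem.Dict Int Int)) (tp : Int × Int) :
    Option (List Int × PySem.Dict Int Int) :=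
  match st with
  | none => none
  | some (quadros, uso) =>
    if quadros.contains tp.2 then some (quadros, uso.insert tp.2 tp.1)
    else if (quadros.length : Int) < nq then some (quadros ++ [tp.2], uso.insert tp.2 tp.1)
    else
      match PySem.List.min? uso.keys (fun k => uso.getD k 0) with
      | none => none
      | some lru =>
        match PySem.List.index? quadros lru with
        | none => none
        | some idx => some (quadros.set idx tp.2, (uso.erase lru).insert tp.2 tp.1)

def algoritmo_lru (sequencia_paginas : List Int) (num_quadros : Int) (pagina_alvo : Int) : String :=
  match (PySem.List.enumerate sequencia_paginas 0).foldl (pvStepA num_quadros) (some ([], PySem.Dict.empty)) with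
  | none => ""  -- the Python raised (outside Pre_)
  | some (quadros, _) =>
    match PySem.List.index? quadros pagina_alvo with
    | some indice => "Para a sequência fornecida, a página " ++ PySem.Int.toStr pagina_alvo ++ " se encontra no Quadro " ++ PySem.Int.toStr ((indice : Int) + 1) ++ "."
    | none => "Ao final, a página " ++ PySem.Int.toStr pagina_alvo ++ " não estava na memória."

-- ===== PORT B =====
-- one iteration of B's loop; `mem` is the page→slot dict in recency order (LRU first)
def pvStepB(nq : Int) (st : Option (PySem.Dict Int Int)) (pagina : Int) : Option (PySem.Dict Int Int) :=
  match st with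
  | none => none
  | some mem =>
    match mem.get? pagina with
    | some slot => some ((mem.erase pagina).insert pagina slot)
    | none =>
      if (mem.size : Int) < nq then some (mem.insert pagina (mem.size : Int))
      else
        match mem.items.head? with
        | none => none
        | some ls => some ((mem.erase ls.1).insert pagina ls.2)

def algoritmo_lru_alt (sequencia_paginas : List Int) (num_quadros : Int) (pagina_alvo : Int) : String :=
  match sequencia_paginas.foldl (pvStepB num_quadros) (some PySem.Dict.empty) with
  | none => ""  -- the Python raised (outside Pre_)
  | some mem =>
    match mem.get? pagina_alvo with
    | some slot => "Para a sequência fornecida, a página " ++ PySem.Int.toStr pagina_alvo ++ " se encontra no Quadro " ++ PySem.Int.toStr (slot + 1) ++ "."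
    | none => "Ao final, a página " ++ PySem.Int.toStr pagina_alvo ++ " não estava na memória."

-- ===== PRECONDITION & SPEC =====
-- Pre_ excludes only the inputs on which A raises: a non-empty sequence with num_quadros < 1
-- makes A call min() on an empty dict (ValueError); B raises there too (StopIteration).
def Pre_algoritmo_lru (sequencia_paginas : List Int) (num_quadros : Int) (pagina_alvo : Int) : Prop :=
  sequencia_paginas = [] ∨ 1 ≤ num_quadros
instance (sequencia_paginas : List Int) (num_quadros : Int) (pagina_alvo : Int) : Decidable (Pre_algoritmo_lru sequencia_paginas num_quadros pagina_alvo) := by unfold Pre_algoritmo_lru; infer_instance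

def pvWitness_algoritmo_lru : List Int × Int × Int := ([1, 2, 3, 1, 4], 3, 1)

def Spec_algoritmo_lru (sequencia_paginas : List Int) (num_quadros : Int) (pagina_alvo : Int) (out : String) : Prop := out = algoritmo_lru_alt sequencia_paginas num_quadros pagina_alvo
instance (sequencia_paginas : List Int) (num_quadros : Int) (pagina_alvo : Int) (out : String) : Decidable (Spec_algoritmo_lru sequencia_paginas num_quadros pagina_alvo out) := by unfold Spec_algoritmo_lru; infer_instance

-- ===== CLAIM (what is proved, stated in full; the proofs are below) =====
def Claim_equal_algoritmo_lru : Prop := ∀ (sequencia_paginas : List Int) (num_quadros : Int) (pagina_alvo : Int), Dom_algoritmo_lru sequencia_paginas num_quadros pagina_alvo → Pre_algoritmo_lru sequencia_paginas num_quadros pagina_alvo → Spec_algoritmo_lru sequencia_paginas num_quadros pagina_alvo (algoritmo_lru sequencia_paginas num_quadros pagina_alvo)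

-- ===== LEMMAS AND PROOFS =====

theorem pvKeys_erase (d : PySem.Dict Int Int) (k : Int) :
    (d.erase k).keys = d.keys.filter (fun x => x ≠ k) := by
  simp only [PySem.Dict.erase, PySem.Dict.keys, List.filter_map]
  congr 1
  exact List.filter_congr (by intro x _; by_cases h : x.1 = k <;> simp [h])

theorem pvGet?_erase (d : PySem.Dict Int Int) (k k' : Int) :
    (d.erase k).get? k' = if k' = k then none else d.get? k' := by
  simp only [PySem.Dict.erase, PySem.Dict.get?]
  split
  · next heq =>
    subst heq
    rw [List.find?_eq_none.mpr]
    · rfl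
    · intro p hp
      simp only [List.mem_filter] at hp
      simpa using hp.2
  · next hne =>
    congr 1
    induction d.items with
    | nil => rfl
    | cons hd t ih =>
      rw [List.filter_cons]
      by_cases hk : hd.1 = k
      · have h1 : (!(hd.1 == k)) = false := by simp [hk]
        have h2 : (hd.1 == k') = false := beq_eq_false_iff_ne.mpr (by rw [hk]; exact fun h => hne h.symm)
        rw [h1, if_neg (by simp), List.find?_cons_of_neg (by simp [h2]), ih]
      · have h1 : (!(hd.1 == k)) = true := by simp [hk]
        rw [h1, if_pos rfl]
        by_cases h3 : hd.1 = k'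
        · rw [List.find?_cons_of_pos (by simp [h3]), List.find?_cons_of_pos (by simp [h3])]
        · rw [List.find?_cons_of_neg (by simp [h3]), List.find?_cons_of_neg (by simp [h3]), ih]

theorem pvPerm_filter_ne {l : List Int} {p : Int} (hn : l.Nodup) (hm : p ∈ l) :
    l.Perm (l.filter (fun x => x ≠ p) ++ [p]) := by
  induction l with
  | nil => simp at hm
  | cons a t ih =>
    rcases List.mem_cons.mp hm with he | ht
    · subst he
      have hnt : p ∉ t := (List.nodup_cons.mp hn).1
      rw [List.filter_cons_of_neg (by simp), List.filter_eq_self.mpr]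
      · exact (List.perm_append_singleton p t).symm
      · intro x hx; simp; rintro rfl; exact hnt hx
    · have hn' := (List.nodup_cons.mp hn).2
      have hne : a ≠ p := by rintro rfl; exact (List.nodup_cons.mp hn).1 ht
      rw [List.filter_cons_of_pos (by simp [hne])]
      exact ((ih hn' ht).cons a).trans (by simp)

theorem pvMin?_head (key : Int → Int) (l ks : List Int)
    (h : l.Pairwise (fun a b => key a < key b)) (hp : ks.Perm l) (hne : ks ≠ []) :
    PySem.List.min? ks key = l.head? := by
  have hlne : l ≠ [] := by intro h0; subst h0; exact hne hp.eq_nil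
  obtain ⟨h0, tl, rfl⟩ := List.exists_cons_of_ne_nil hlne
  obtain ⟨m, hm⟩ : ∃ m, PySem.List.min? ks key = some m := by
    cases hmm : PySem.List.min? ks key with
    | none => exact absurd ((PySem.List.min?_eq_none_iff ks key).mp hmm) hne
    | some m => exact ⟨m, rfl⟩
  have hmem : m ∈ ks := PySem.List.min?_mem hm
  have hmin : ∀ y ∈ ks, key m ≤ key y := PySem.List.min?_isMin hm
  have hml : m ∈ h0 :: tl := hp.mem_iff.mp hmem
  rcases List.mem_cons.mp hml with rfl | hmt
  · rw [hm]; rfl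
  · have h1 : key h0 < key m := (List.pairwise_cons.mp h).1 m hmt
    have h2 : key m ≤ key h0 := hmin h0 (hp.mem_iff.mpr (List.mem_cons_self))
    omega

theorem pvGetD_erase (d : PySem.Dict Int Int) (k k' d0 : Int) :
    (d.erase k).getD k' d0 = if k' = k then d0 else d.getD k' d0 := by
  rw [PySem.Dict.getD_eq_get?_getD, pvGet?_erase]
  split <;> simp [PySem.Dict.getD_eq_get?_getD]

theorem pvSet_mid (pre suf : List Int) (a b : Int) :
    (pre ++ a :: suf).set pre.length b = pre ++ b :: suf := by
  induction pre with
  | nil => rfl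
  | cons x xs ih => simp [ih]

theorem pvIndex?_mid_self (pre suf : List Int) (p : Int) (hp : p ∉ pre) :
    PySem.List.index? (pre ++ p :: suf) p = some pre.length := by
  induction pre with
  | nil => exact PySem.List.index?_cons_self p suf
  | cons x xs ih =>
    rw [List.cons_append,
      PySem.List.index?_cons_of_ne _ (fun h => hp (by rw [h]; exact List.mem_cons_self)),
      ih (fun h => hp (List.mem_cons.mpr (Or.inr h)))]
    rfl

theorem pvIndex?_mid_ne (pre suf : List Int) (x y q : Int) (hx : q ≠ x) (hy : q ≠ y) :
    PySem.List.index? (pre ++ x :: suf) q = PySem.List.index? (pre ++ y :: suf) q := by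
  induction pre with
  | nil =>
    rw [List.nil_append, List.nil_append,
      PySem.List.index?_cons_of_ne _ (Ne.symm hx), PySem.List.index?_cons_of_ne _ (Ne.symm hy)]
  | cons a t ih =>
    by_cases h : a = q
    · subst h
      rw [List.cons_append, List.cons_append, PySem.List.index?_cons_self, PySem.List.index?_cons_self]
    · rw [List.cons_append, List.cons_append,
        PySem.List.index?_cons_of_ne _ h, PySem.List.index?_cons_of_ne _ h, ih]

theorem pvGet?_head (mem : PySem.Dict Int Int) (l0 s0 : Int) (rest : List (Int × Int))
    (h : mem.items = (l0, s0) :: rest) : mem.get? l0 = some s0 := by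
  simp [PySem.Dict.get?, h]

-- the simulation invariant between A's loop state (quadros, uso) and B's state mem:
-- mem's keys are exactly the pages in the frames, listed in increasing order of last use,
-- and each page is mapped to its frame index; all recorded times are below the clock t
def pvInv (t : Int) (quadros : List Int) (uso mem : PySem.Dict Int Int) : Prop :=
  quadros.Nodup ∧
  uso.keys.Perm quadros ∧
  mem.keys.Perm quadros ∧
  List.Pairwise (fun a b => uso.getD a 0 < uso.getD b 0) mem.keys ∧
  (∀ p s, mem.get? p = some s → ∃ k : Nat, PySem.List.index? quadros p = some k ∧ s = (k : Int)) ∧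
  (∀ p, p ∈ quadros → uso.getD p 0 < t)

theorem pvStep_sim (nq t p : Int) (quadros : List Int) (uso mem : PySem.Dict Int Int)
    (hnq : 1 ≤ nq) (h : pvInv t quadros uso mem) :
    ∃ q' u' m', pvStepA nq (some (quadros, uso)) (t, p) = some (q', u') ∧
      pvStepB nq (some mem) p = some m' ∧ pvInv (t + 1) q' u' m' := by
  obtain ⟨hnd, hpu, hpm, hpw, hslot, htime⟩ := h
  have hndm : mem.keys.Nodup := hpm.nodup_iff.mpr hnd
  have hndu : uso.keys.Nodup := hpu.nodup_iff.mpr hnd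
  by_cases hin : p ∈ quadros
  · -- HIT
    have hc : quadros.contains p = true := List.contains_iff_mem.mpr hin
    have hpk : p ∈ mem.keys := hpm.mem_iff.mpr hin
    obtain ⟨s, hs⟩ : ∃ s, mem.get? p = some s := by
      cases hg : mem.get? p with
      | none => exact absurd ((PySem.Dict.get?_eq_none_iff_not_mem_keys mem p).mp hg) (by simpa using hpk)
      | some s => exact ⟨s, rfl⟩
    refine ⟨quadros, uso.insert p t, (mem.erase p).insert p s, ?_, by simp [pvStepB, hs], ?_⟩
    · simp only [pvStepA, hc, if_true]
    have huc : uso.contains p = true := (PySem.Dict.contains_iff_mem_keys uso p).mpr (hpu.mem_iff.mpr hin)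
    have hkeysu : (uso.insert p t).keys = uso.keys := PySem.Dict.keys_insert_of_contains uso t huc
    have hmec : (mem.erase p).contains p = false := by
      rw [← Bool.not_eq_true, PySem.Dict.contains_iff_mem_keys, pvKeys_erase]
      simp
    have hkeysm : ((mem.erase p).insert p s).keys = mem.keys.filter (fun x => x ≠ p) ++ [p] := by
      rw [PySem.Dict.keys_insert_of_not_contains _ _ hmec, pvKeys_erase]
    have hpf := pvPerm_filter_ne hndm hpk
    refine ⟨hnd, hkeysu ▸ hpu, ?_, ?_, ?_, ?_⟩
    · rw [hkeysm]; exact hpf.symm.trans hpm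
    · rw [hkeysm]
      have hsub : (mem.keys.filter (fun x => x ≠ p)).Sublist mem.keys := List.filter_sublist
      apply List.pairwise_append.mpr
      refine ⟨?_, List.pairwise_singleton _ _, ?_⟩
      · refine (hpw.sublist hsub).imp_of_mem ?_
        intro a b ha hb hab
        have hane : a ≠ p := by simpa using (List.mem_filter.mp ha).2
        have hbne : b ≠ p := by simpa using (List.mem_filter.mp hb).2
        rwa [PySem.Dict.getD_insert, PySem.Dict.getD_insert, if_neg hane, if_neg hbne]
      · intro a ha b hb
        rw [List.mem_singleton] at hb
        have hane : a ≠ p := by simpa using (List.mem_filter.mp ha).2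
        rw [PySem.Dict.getD_insert, PySem.Dict.getD_insert, if_neg hane, if_pos hb]
        exact htime a (hpm.mem_iff.mp (List.mem_of_mem_filter ha))
    · intro q sq hq
      rw [PySem.Dict.get?_insert] at hq
      by_cases hqp : q = p
      · rw [if_pos hqp] at hq
        have hsq : s = sq := Option.some.inj hq
        obtain ⟨k, hk, hsk⟩ := hslot p s hs
        exact ⟨k, hqp ▸ hk, by omega⟩
      · rw [if_neg hqp, pvGet?_erase, if_neg hqp] at hq
        exact hslot q sq hq
    · intro q hq
      rw [PySem.Dict.getD_insert]
      by_cases hqp : q = p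
      · rw [if_pos hqp]; omega
      · rw [if_neg hqp]; exact lt_trans (htime q hq) (by omega)
  · -- MISS
    have hc : quadros.contains p = false := by
      rw [← Bool.not_eq_true, List.contains_iff_mem]; exact hin
    have hpk : p ∉ mem.keys := fun h => hin (hpm.mem_iff.mp h)
    have hpu' : p ∉ uso.keys := fun h => hin (hpu.mem_iff.mp h)
    have hgp : mem.get? p = none := (PySem.Dict.get?_eq_none_iff_not_mem_keys mem p).mpr hpk
    have hsz : mem.size = quadros.length := by
      have : mem.keys.length = quadros.length := hpm.length_eq
      simpa [PySem.Dict.size, PySem.Dict.keys] using this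
    have hmc : mem.contains p = false := by
      rw [← Bool.not_eq_true, PySem.Dict.contains_iff_mem_keys]; exact hpk
    have huc : uso.contains p = false := by
      rw [← Bool.not_eq_true, PySem.Dict.contains_iff_mem_keys]; exact hpu'
    by_cases hlen : (quadros.length : Int) < nq
    · -- free frame
      refine ⟨quadros ++ [p], uso.insert p t, mem.insert p (mem.size : Int),
        ?_, by simp [pvStepB, hgp, hsz, hlen], ?_⟩
      · simp only [pvStepA, hc, if_false, Bool.false_eq_true, hlen, if_true]
      have hkeysu : (uso.insert p t).keys = uso.keys ++ [p] :=
        PySem.Dict.keys_insert_of_not_contains _ _ huc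
      have hkeysm : (mem.insert p (mem.size : Int)).keys = mem.keys ++ [p] :=
        PySem.Dict.keys_insert_of_not_contains _ _ hmc
      refine ⟨?_, ?_, ?_, ?_, ?_, ?_⟩
      · simp [List.nodup_append, hnd]
        exact fun a ha hap => hin (hap ▸ ha)
      · rw [hkeysu]; exact hpu.append (List.Perm.refl [p])
      · rw [hkeysm]; exact hpm.append (List.Perm.refl [p])
      · rw [hkeysm]
        apply List.pairwise_append.mpr
        refine ⟨?_, List.pairwise_singleton _ _, ?_⟩
        · refine hpw.imp_of_mem ?_
          intro a b ha hb hab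
          have hane : a ≠ p := fun h => hpk (h ▸ ha)
          have hbne : b ≠ p := fun h => hpk (h ▸ hb)
          rwa [PySem.Dict.getD_insert, PySem.Dict.getD_insert, if_neg hane, if_neg hbne]
        · intro a ha b hb
          rw [List.mem_singleton] at hb
          have hane : a ≠ p := fun h => hpk (h ▸ ha)
          rw [PySem.Dict.getD_insert, PySem.Dict.getD_insert, if_neg hane, if_pos hb]
          exact htime a (hpm.mem_iff.mp ha)
      · intro q sq hq
        rw [PySem.Dict.get?_insert] at hq
        by_cases hqp : q = p
        · rw [if_pos hqp] at hq
          have hsq : (mem.size : Int) = sq := Option.some.inj hq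
          refine ⟨quadros.length, hqp ▸ PySem.List.index?_append_singleton_self quadros p hin, ?_⟩
          rw [← hsz]; omega
        · rw [if_neg hqp] at hq
          obtain ⟨k, hk, hsk⟩ := hslot q sq hq
          have hqm : q ∈ quadros := by
            by_contra hq'
            rw [(PySem.List.index?_eq_none_iff quadros q).mpr hq'] at hk; simp at hk
          exact ⟨k, by rw [PySem.List.index?_append_of_mem _ hqm]; exact hk, hsk⟩
      · intro q hq
        rw [PySem.Dict.getD_insert]
        rcases List.mem_append.mp hq with hq | hq
        · have hqp : q ≠ p := fun h => hin (h ▸ hq)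
          rw [if_neg hqp]; exact lt_trans (htime q hq) (by omega)
        · rw [List.mem_singleton] at hq; subst hq
          rw [if_pos rfl]; omega
    · -- eviction
      have hqne : quadros ≠ [] := by
        intro h0; rw [h0] at hlen; simp at hlen; omega
      have hkne : uso.keys ≠ [] := by
        intro h0
        have := hpu.length_eq
        rw [h0] at this
        exact hqne (List.length_eq_zero_iff.mp this.symm)
      have hmne : mem.items ≠ [] := by
        intro h0
        have hk0 : mem.keys = [] := by simp [PySem.Dict.keys, h0]
        have := hpm.length_eq
        rw [hk0] at this
        exact hqne (List.length_eq_zero_iff.mp this.symm)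
      obtain ⟨ls, rest, hitems⟩ := List.exists_cons_of_ne_nil hmne
      obtain ⟨l0, s0⟩ := ls
      have hkeysm0 : mem.keys = l0 :: rest.map Prod.fst := by simp [PySem.Dict.keys, hitems]
      have hgl0 : mem.get? l0 = some s0 := pvGet?_head mem l0 s0 rest hitems
      obtain ⟨k, hk, hs0k⟩ := hslot l0 s0 hgl0
      obtain ⟨pre, suf, hquad, hklen, hl0pre⟩ := (PySem.List.index?_eq_some_iff quadros l0 k).mp hk
      have hl0suf : l0 ∉ suf := by
        rw [hquad, List.nodup_middle, List.nodup_cons] at hnd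
        exact fun h => hnd.1 (List.mem_append.mpr (Or.inr h))
      have hl0q : l0 ∈ quadros := by rw [hquad]; exact List.mem_append.mpr (Or.inr List.mem_cons_self)
      have hppre : p ∉ pre := fun h => hin (by rw [hquad]; exact List.mem_append.mpr (Or.inl h))
      have hpsuf : p ∉ suf := fun h => hin (by rw [hquad]; exact List.mem_append.mpr (Or.inr (List.mem_cons.mpr (Or.inr h))))
      have hpl0 : p ≠ l0 := fun h => hin (h ▸ hl0q)
      have hperm2 : uso.keys.Perm mem.keys := hpu.trans hpm.symm
      have hmin : PySem.List.min? uso.keys (fun x => uso.getD x 0) = some l0 := by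
        rw [pvMin?_head (fun x => uso.getD x 0) mem.keys uso.keys hpw hperm2 hkne, hkeysm0]
        rfl
      have hset : quadros.set k p = pre ++ p :: suf := by
        rw [hquad, ← hklen, pvSet_mid]
      have stepA : pvStepA nq (some (quadros, uso)) (t, p)
          = some (pre ++ p :: suf, (uso.erase l0).insert p t) := by
        simp only [pvStepA, hc, Bool.false_eq_true, if_false, if_neg hlen, hmin, hk, hset]
      have stepB : pvStepB nq (some mem) p = some ((mem.erase l0).insert p s0) := by
        simp only [pvStepB, hgp]
        rw [hsz, if_neg hlen, hitems]
        rfl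
      refine ⟨pre ++ p :: suf, (uso.erase l0).insert p t, (mem.erase l0).insert p s0, stepA, stepB, ?_, ?_, ?_, ?_, ?_, ?_⟩
      · -- Nodup
        rw [hquad, List.nodup_middle, List.nodup_cons] at hnd
        rw [List.nodup_middle, List.nodup_cons]
        refine ⟨fun h => hin ?_, hnd.2⟩
        rw [hquad]
        rcases List.mem_append.mp h with h | h
        · exact List.mem_append.mpr (Or.inl h)
        · exact List.mem_append.mpr (Or.inr (List.mem_cons.mpr (Or.inr h)))
      · -- uso' keys perm
        have hpec : (uso.erase l0).contains p = false := by
          rw [← Bool.not_eq_true, PySem.Dict.contains_iff_mem_keys, pvKeys_erase]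
          intro h
          exact hpu' (List.mem_of_mem_filter h)
        rw [PySem.Dict.keys_insert_of_not_contains _ _ hpec, pvKeys_erase]
        have h1 : (uso.keys.filter (fun x => x ≠ l0)).Perm (quadros.filter (fun x => x ≠ l0)) :=
          hpu.filter _
        have h2 : quadros.filter (fun x => x ≠ l0) = pre ++ suf := by
          rw [hquad, List.filter_append, List.filter_cons_of_neg (by simp),
            List.filter_eq_self.mpr (fun a ha => by simp; rintro rfl; exact hl0pre ha),
            List.filter_eq_self.mpr (fun a ha => by simp; rintro rfl; exact hl0suf ha)]
        rw [h2] at h1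
        exact (h1.append (List.Perm.refl [p])).trans
          ((List.perm_append_singleton p (pre ++ suf)).trans List.perm_middle.symm)
      · -- mem' keys perm
        have hpec : (mem.erase l0).contains p = false := by
          rw [← Bool.not_eq_true, PySem.Dict.contains_iff_mem_keys, pvKeys_erase]
          intro h
          exact hpk (List.mem_of_mem_filter h)
        rw [PySem.Dict.keys_insert_of_not_contains _ _ hpec, pvKeys_erase]
        have hl0r : l0 ∉ rest.map Prod.fst := by
          rw [hkeysm0] at hndm
          exact (List.nodup_cons.mp hndm).1
        have hfil : mem.keys.filter (fun x => x ≠ l0) = rest.map Prod.fst := by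
          rw [hkeysm0, List.filter_cons_of_neg (by simp),
            List.filter_eq_self.mpr (fun a ha => by simp; rintro rfl; exact hl0r ha)]
        rw [hfil]
        have hrk : (rest.map Prod.fst).Perm (pre ++ suf) := by
          have : (l0 :: rest.map Prod.fst).Perm (l0 :: (pre ++ suf)) := by
            rw [← hkeysm0]
            exact hpm.trans (by rw [hquad]; exact List.perm_middle)
          exact this.cons_inv
        exact (hrk.append (List.Perm.refl [p])).trans
          ((List.perm_append_singleton p (pre ++ suf)).trans List.perm_middle.symm)
      · -- pairwise
        have hl0r : l0 ∉ rest.map Prod.fst := by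
          rw [hkeysm0] at hndm
          exact (List.nodup_cons.mp hndm).1
        have hpec : (mem.erase l0).contains p = false := by
          rw [← Bool.not_eq_true, PySem.Dict.contains_iff_mem_keys, pvKeys_erase]
          intro h
          exact hpk (List.mem_of_mem_filter h)
        have hfil : mem.keys.filter (fun x => x ≠ l0) = rest.map Prod.fst := by
          rw [hkeysm0, List.filter_cons_of_neg (by simp),
            List.filter_eq_self.mpr (fun a ha => by simp; rintro rfl; exact hl0r ha)]
        rw [PySem.Dict.keys_insert_of_not_contains _ _ hpec, pvKeys_erase, hfil]
        have htl : List.Pairwise (fun a b => uso.getD a 0 < uso.getD b 0) (rest.map Prod.fst) := by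
          rw [hkeysm0] at hpw
          exact (List.pairwise_cons.mp hpw).2
        apply List.pairwise_append.mpr
        refine ⟨?_, List.pairwise_singleton _ _, ?_⟩
        · refine htl.imp_of_mem ?_
          intro a b ha hb hab
          have har : a ∈ mem.keys := by rw [hkeysm0]; exact List.mem_cons.mpr (Or.inr ha)
          have hbr : b ∈ mem.keys := by rw [hkeysm0]; exact List.mem_cons.mpr (Or.inr hb)
          have hanep : a ≠ p := fun h => hpk (h ▸ har)
          have hbnep : b ≠ p := fun h => hpk (h ▸ hbr)
          have hanel : a ≠ l0 := fun h => hl0r (h ▸ ha)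
          have hbnel : b ≠ l0 := fun h => hl0r (h ▸ hb)
          rwa [PySem.Dict.getD_insert, PySem.Dict.getD_insert, if_neg hanep, if_neg hbnep,
            pvGetD_erase, pvGetD_erase, if_neg hanel, if_neg hbnel]
        · intro a ha b hb
          rw [List.mem_singleton] at hb
          have har : a ∈ mem.keys := by rw [hkeysm0]; exact List.mem_cons.mpr (Or.inr ha)
          have hanep : a ≠ p := fun h => hpk (h ▸ har)
          have hanel : a ≠ l0 := fun h => hl0r (h ▸ ha)
          rw [PySem.Dict.getD_insert, PySem.Dict.getD_insert, if_neg hanep, if_pos hb,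
            pvGetD_erase, if_neg hanel]
          exact htime a (hpm.mem_iff.mp har)
      · -- slot
        intro q sq hq
        rw [PySem.Dict.get?_insert] at hq
        by_cases hqp : q = p
        · rw [if_pos hqp] at hq
          have hsq : s0 = sq := Option.some.inj hq
          refine ⟨k, ?_, by omega⟩
          rw [hqp, ← hklen]
          exact pvIndex?_mid_self pre suf p hppre
        · rw [if_neg hqp, pvGet?_erase] at hq
          by_cases hql : q = l0
          · rw [if_pos hql] at hq
            simp at hq
          · rw [if_neg hql] at hq
            obtain ⟨kq, hkq, hskq⟩ := hslot q sq hq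
            refine ⟨kq, ?_, hskq⟩
            rw [pvIndex?_mid_ne pre suf p l0 q hqp hql, ← hquad]
            exact hkq
      · -- time bound
        intro q hq
        rw [PySem.Dict.getD_insert]
        by_cases hqp : q = p
        · rw [if_pos hqp]; omega
        · rw [if_neg hqp]
          have hql : q ≠ l0 := by
            rintro rfl
            rcases List.mem_append.mp hq with h | h
            · exact hl0pre h
            · rcases List.mem_cons.mp h with h | h
              · exact hqp h
              · exact hl0suf h
          rw [pvGetD_erase, if_neg hql]
          have hqq : q ∈ quadros := by
            rw [hquad]
            rcases List.mem_append.mp hq with h | h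
            · exact List.mem_append.mpr (Or.inl h)
            · rcases List.mem_cons.mp h with h | h
              · exact absurd h hqp
              · exact List.mem_append.mpr (Or.inr (List.mem_cons.mpr (Or.inr h)))
          exact lt_trans (htime q hqq) (by omega)

theorem pvFold_sim (nq : Int) (hnq : 1 ≤ nq) :
    ∀ (ps : List Int) (t : Int) (quadros : List Int) (uso mem : PySem.Dict Int Int),
    pvInv t quadros uso mem →
    ∃ q' u' m', (PySem.List.enumerate ps t).foldl (pvStepA nq) (some (quadros, uso)) = some (q', u') ∧
      ps.foldl (pvStepB nq) (some mem) = some m' ∧ pvInv (t + ps.length) q' u' m' := by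
  intro ps
  induction ps with
  | nil =>
    intro t q u m h
    exact ⟨q, u, m, by simp [PySem.List.enumerate], rfl, by simpa using h⟩
  | cons p ps ih =>
    intro t q u m h
    obtain ⟨q1, u1, m1, hA, hB, h1⟩ := pvStep_sim nq t p q u m hnq h
    obtain ⟨q', u', m', hA', hB', h'⟩ := ih (t + 1) q1 u1 m1 h1
    refine ⟨q', u', m', ?_, ?_, ?_⟩
    · rw [PySem.List.enumerate_cons]
      simp only [List.foldl_cons]
      rw [hA]
      exact hA'
    · simp only [List.foldl_cons]
      rw [hB]
      exact hB'
    · have harith : t + ((p :: ps).length : Int) = (t + 1) + ps.length := by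
        simp [List.length_cons]
        ring
      rw [harith]
      exact h'

theorem pvFinal (seq : List Int) (nq tgt : Int) (hpre : seq = [] ∨ 1 ≤ nq) :
    algoritmo_lru seq nq tgt = algoritmo_lru_alt seq nq tgt := by
  rcases hpre with rfl | hnq
  · rfl
  · have hinv : pvInv 0 [] PySem.Dict.empty PySem.Dict.empty := by
      refine ⟨List.nodup_nil, ?_, ?_, ?_, ?_, ?_⟩
      · simp [PySem.Dict.keys, PySem.Dict.empty]
      · simp [PySem.Dict.keys, PySem.Dict.empty]
      · simp [PySem.Dict.keys, PySem.Dict.empty]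
      · intro p s hp
        rw [PySem.Dict.get?_empty] at hp
        simp at hp
      · intro p hp
        exact absurd hp (List.not_mem_nil)
    obtain ⟨q', u', m', hA, hB, hfin⟩ := pvFold_sim nq hnq seq 0 [] PySem.Dict.empty PySem.Dict.empty hinv
    obtain ⟨hnd, hpu, hpm, hpw, hslot, htime⟩ := hfin
    unfold algoritmo_lru algoritmo_lru_alt
    rw [hA, hB]
    dsimp only
    cases hg : m'.get? tgt with
    | some s =>
      obtain ⟨k, hk, hsk⟩ := hslot tgt s hg
      rw [hk, hsk]
    | none =>
      have htgt : tgt ∉ q' := fun h =>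
        ((PySem.Dict.get?_eq_none_iff_not_mem_keys m' tgt).mp hg) (hpm.mem_iff.mpr h)
      rw [(PySem.List.index?_eq_none_iff q' tgt).mpr htgt]

-- ===== VERDICT (by name: the statement is the Claim_ definition above) =====
theorem algoritmo_lru_spec : Claim_equal_algoritmo_lru := by
  intro seq nq tgt _ hpre
  unfold Spec_algoritmo_lru
  exact pvFinal seq nq tgt hpre
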